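-- pv_equiv track=rewrite | github.com/pypi-data/pypi-mirror-116 | packages/crownstone-uart/crownstone_uart-0.7.7-py3.6.egg/crownstone_uart/core/uart/UartLogParser.py | getFileNameHash
-- ===== SOURCE A (Python) =====
-- def getFileNameHash(fileName: str):
-- 	byteArray = bytearray()
-- 	byteArray.extend(map(ord, fileName))
--
-- 	hashVal: int = 5381
-- 	# A string in C ends with 0.
-- 	hashVal = (hashVal * 33 + 0) & 0xFFFFFFFF
-- 	for c in reversed(byteArray):
-- 		if c == ord('/'):
-- 			return hashVal
-- 		hashVal = (hashVal * 33 + c) & 0xFFFFFFFF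
-- 	return hashVal
-- ===== SOURCE B (Python) =====
-- def getFileNameHash(fileName: str):
-- 	byteArray = bytearray()
-- 	byteArray.extend(map(ord, fileName))
-- 	idx = byteArray.rfind(ord('/'))
-- 	suffix = byteArray[idx + 1:]
-- 	hashVal = (5381 * 33) & 0xFFFFFFFF
-- 	for c in reversed(suffix):
-- 		hashVal = (hashVal * 33 + c) & 0xFFFFFFFF
-- 	return hashVal
-- ===== Notes on version B (the rewrite author's own statement) =====
-- stated objective: alternative
-- what changed: Replaces the single reverse pass with an in-loop '/' early-return by a two-phase computation: rfind locates the last '/', a slice takes the suffix, and a branch-free loop hashes it.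
import Mathlib
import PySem

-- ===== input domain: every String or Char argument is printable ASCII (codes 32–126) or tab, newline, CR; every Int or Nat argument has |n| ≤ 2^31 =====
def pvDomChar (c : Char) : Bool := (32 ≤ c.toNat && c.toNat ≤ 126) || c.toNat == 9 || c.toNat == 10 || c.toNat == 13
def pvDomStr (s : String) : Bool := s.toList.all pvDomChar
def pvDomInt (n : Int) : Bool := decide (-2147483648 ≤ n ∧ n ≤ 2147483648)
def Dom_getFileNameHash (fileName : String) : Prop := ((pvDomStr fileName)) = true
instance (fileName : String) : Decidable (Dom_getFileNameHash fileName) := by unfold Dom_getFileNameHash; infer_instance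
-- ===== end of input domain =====

-- B replaces A's single reverse pass with an in-loop '/' early-return by a two-phase
-- computation: rfind locates the last '/', a slice takes the suffix, and a branch-free
-- loop hashes it (objective: alternative; same cost).

-- ===== PORT A =====
-- A's loop over reversed(byteArray) with early return at '/'
def pvALoop : List Int → Int → Int
  | [], h => h
  | c :: rest, h => if c = 47 then h else pvALoop rest ((h * 33 + c) % 4294967296)

def getFileNameHash (fileName : String) : Int :=
  let byteArray : List Int := fileName.toList.map (fun c => (c.toNat : Int))
  let hashVal : Int := (5381 * 33 + 0) % 4294967296
  pvALoop byteArray.reverse hashVal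

-- ===== PORT B =====
-- bytearray.rfind: index of last occurrence of t, or -1 (scan with running best)
def pvRFindAux : List Int → Int → Int → Int → Int
  | [], _, _, best => best
  | c :: rest, t, i, best => pvRFindAux rest t (i + 1) (if c = t then i else best)

def getFileNameHash_alt (fileName : String) : Int :=
  let byteArray : List Int := fileName.toList.map (fun c => (c.toNat : Int))
  let idx : Int := pvRFindAux byteArray 47 0 (-1)
  let suffix : List Int := byteArray.drop (idx + 1).toNat
  suffix.reverse.foldl (fun h c => (h * 33 + c) % 4294967296) ((5381 * 33) % 4294967296)

-- ===== PRECONDITION & SPEC =====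
def Spec_getFileNameHash (fileName : String) (out : Int) : Prop := out = getFileNameHash_alt fileName
instance (fileName : String) (out : Int) : Decidable (Spec_getFileNameHash fileName out) := by unfold Spec_getFileNameHash; infer_instance

-- ===== CLAIM (what is proved, stated in full; the proofs are below) =====
def Claim_equal_getFileNameHash : Prop := ∀ (fileName : String), Dom_getFileNameHash fileName → Spec_getFileNameHash fileName (getFileNameHash fileName)

-- ===== LEMMAS AND PROOFS =====

theorem pvRFindAux_append (l : List Int) (a t i best : Int) :
    pvRFindAux (l ++ [a]) t i best =
      if a = t then i + l.length else pvRFindAux l t i best := by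
  induction l generalizing i best with
  | nil => simp [pvRFindAux]
  | cons c rest ih =>
      simp only [List.cons_append, pvRFindAux, ih]
      split
      · simp
        omega
      · simp

theorem pvRFindAux_bound (l : List Int) (t i best : Int) (hb : best < i) :
    pvRFindAux l t i best < i + l.length := by
  induction l generalizing i best with
  | nil => simpa [pvRFindAux] using by omega
  | cons c rest ih =>
      simp only [pvRFindAux, List.length_cons]
      have := ih (i + 1) (if c = t then i else best) (by split <;> omega)
      omega

theorem pvMain (l : List Int) (h : Int) :
    pvALoop l.reverse h =
      ((l.drop ((pvRFindAux l 47 0 (-1)) + 1).toNat).reverse).foldl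
        (fun h c => (h * 33 + c) % 4294967296) h := by
  induction l using List.reverseRecOn generalizing h with
  | nil => simp [pvALoop, pvRFindAux]
  | append_singleton l' a ih =>
      rw [pvRFindAux_append]
      by_cases ha : a = 47
      · subst ha
        rw [if_pos rfl]
        have hd : (l' ++ [(47 : Int)]).drop ((0 + (l'.length : Int) + 1)).toNat = [] := by
          apply List.drop_eq_nil_of_le
          simp
        rw [hd]
        simp [pvALoop]
      · rw [if_neg ha]
        have hb := pvRFindAux_bound l' 47 0 (-1) (by omega)
        have hle : ((pvRFindAux l' 47 0 (-1)) + 1).toNat ≤ l'.length := by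
          simp at hb; omega
        rw [List.drop_append_of_le_length hle]
        simp only [List.reverse_append, List.reverse_cons, List.reverse_nil,
          List.nil_append, List.cons_append, List.foldl_cons, pvALoop]
        rw [if_neg ha]
        exact ih _

-- ===== VERDICT (by name: the statement is the Claim_ definition above) =====
theorem getFileNameHash_spec : Claim_equal_getFileNameHash := by
  intro fileName _
  show _ = _
  unfold getFileNameHash getFileNameHash_alt
  simpa using pvMain (fileName.toList.map (fun c => (c.toNat : Int))) ((5381 * 33 + 0) % 4294967296)
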